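-- pv_equiv track=rewrite | github.com/CharlotteBones/Msc-Coursework | ISD-CW2.py | lifeStage
-- ===== SOURCE A (Python) =====
-- def lifeStage(mammal, age):
--     mammals = ["h","d"]
--     ranges = [[0, 132,300,588],[0, 6,24,84]]
--     outcomes = ["Juvenile","Adolescent","Mature","Senior"]
--     feedback = [ "Not a valid mammal","Age is not a positive whole number", "Both inputs are not valid"]
--
-- #validity check using if statements before progressing the inputs further.
--     if mammal not in mammals and age.isdigit() == False:
--         return False, feedback[2]
--     elif mammal not in mammals:
--         return False, feedback[0]
--     elif age.isdigit() == False: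
--         return False, feedback[1]
--
--     age = int(age)
-- #Checking which list in ranges to use to parse into the for loop.
--     if mammal == 'h':
--         rangeList = 0
--     else:
--         rangeList = 1
--
-- #For loop with nested if statement to compare the age range to the given age and return a tuple.
--     for x in ranges[rangeList]:
--         index = ranges[rangeList].index(x) - 1
--         if age < x:
--             return True, outcomes[index]
--     else:
--         return True, outcomes[-1]
-- ===== SOURCE B (Python) =====
-- def lifeStage(mammal, age):
--     valid_m = mammal in ("h", "d")
--     valid_a = age.isdigit()
--     if not valid_m or not valid_a:
--         if not valid_m and not valid_a:
--             return False, "Both inputs are not valid"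
--         if not valid_m:
--             return False, "Not a valid mammal"
--         return False, "Age is not a positive whole number"
--     b0, b1, b2 = (132, 300, 588) if mammal == "h" else (6, 24, 84)
--     n = int(age)
--     i = (n >= b0) + (n >= b1) + (n >= b2)
--     return True, ("Juvenile", "Adolescent", "Mature", "Senior")[i]
-- ===== Notes on version B (the rewrite author's own statement) =====
-- stated objective: simpler
-- what changed: Replaces A's loop over the threshold list with its per-element .index() rescan by a direct arithmetic index (count of thresholds not exceeding the age) into the outcome table; validation is a flat early-return chain over two precomputed flags.
import Mathlib
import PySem

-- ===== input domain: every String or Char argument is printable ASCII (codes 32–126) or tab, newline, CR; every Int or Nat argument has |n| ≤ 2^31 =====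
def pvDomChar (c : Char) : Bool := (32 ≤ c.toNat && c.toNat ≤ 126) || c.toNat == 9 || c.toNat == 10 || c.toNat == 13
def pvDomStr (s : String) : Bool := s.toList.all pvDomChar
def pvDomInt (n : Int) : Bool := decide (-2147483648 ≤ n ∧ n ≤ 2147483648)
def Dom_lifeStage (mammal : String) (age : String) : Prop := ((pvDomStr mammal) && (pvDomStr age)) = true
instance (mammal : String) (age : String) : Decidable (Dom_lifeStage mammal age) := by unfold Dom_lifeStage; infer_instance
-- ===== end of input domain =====

-- B replaces A's threshold loop (with its per-element .index rescan) by a direct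
-- arithmetic index into the outcome table; simpler, same validation behaviour.


-- ===== PORT A =====
-- the for-loop over ranges[rangeList]: walks the remaining list, `index` recomputed
-- from the FULL list by .index (elements are distinct, so .index never raises);
-- the [] case is the for-else branch returning outcomes[-1]
def scanA (full : List Int) (outcomes : List String) (age : Int) : List Int → Bool × String
  | [] => (true, PySem.List.pyGetD outcomes (-1) "")
  | x :: xs =>
    let index : Int := ((PySem.List.index? full x).getD 0 : Int) - 1
    if age < x then (true, PySem.List.pyGetD outcomes index "")
    else scanA full outcomes age xs

def lifeStage (mammal : String) (age : String) : Bool × String :=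
  let mammals : List String := ["h", "d"]
  let ranges : List (List Int) := [[0, 132, 300, 588], [0, 6, 24, 84]]
  let outcomes : List String := ["Juvenile", "Adolescent", "Mature", "Senior"]
  let feedback : List String :=
    ["Not a valid mammal", "Age is not a positive whole number", "Both inputs are not valid"]
  if !(mammals.contains mammal) && (PySem.Str.strIsdigit age == false) then
    (false, PySem.List.pyGetD feedback 2 "")
  else if !(mammals.contains mammal) then
    (false, PySem.List.pyGetD feedback 0 "")
  else if PySem.Str.strIsdigit age == false then
    (false, PySem.List.pyGetD feedback 1 "")
  else
    -- int(age): isdigit is true here, so ofStr? never returns none; .getD 0 is unreachable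
    let ageI : Int := (PySem.Int.ofStr? age).getD 0
    let rangeList : Nat := if mammal == "h" then 0 else 1
    let r : List Int := (ranges.getD rangeList [])
    scanA r outcomes ageI r

-- ===== PORT B =====
def lifeStage_alt (mammal : String) (age : String) : Bool × String :=
  let valid_m := mammal == "h" || mammal == "d"
  let valid_a := PySem.Str.strIsdigit age
  if !valid_m || !valid_a then
    if !valid_m && !valid_a then (false, "Both inputs are not valid")
    else if !valid_m then (false, "Not a valid mammal")
    else (false, "Age is not a positive whole number")
  else
    let b : Int × Int × Int := if mammal == "h" then (132, 300, 588) else (6, 24, 84)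
    -- int(age): valid_a holds here, so ofStr? never returns none; .getD 0 is unreachable
    let n : Int := (PySem.Int.ofStr? age).getD 0
    let i : Nat := (if b.1 ≤ n then 1 else 0) + (if b.2.1 ≤ n then 1 else 0) +
      (if b.2.2 ≤ n then 1 else 0)
    (true, ["Juvenile", "Adolescent", "Mature", "Senior"].getD i "")

-- ===== PRECONDITION & SPEC =====
def Spec_lifeStage (mammal : String) (age : String) (out : Bool × String) : Prop := out = lifeStage_alt mammal age
instance (mammal : String) (age : String) (out : Bool × String) : Decidable (Spec_lifeStage mammal age out) := by unfold Spec_lifeStage; infer_instance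

-- ===== CLAIM (what is proved, stated in full; the proofs are below) =====
def Claim_equal_lifeStage : Prop := ∀ (mammal : String) (age : String), Dom_lifeStage mammal age → Spec_lifeStage mammal age (lifeStage mammal age)

-- ===== LEMMAS AND PROOFS =====
theorem isIntSpace_eq_false_of_isdigit (c : Char) (h : PySem.Chars.isdigit c = true) :
    PySem.Int.isIntSpace c = false := by
  by_contra hne
  rw [Bool.not_eq_false] at hne
  simp [PySem.Int.isIntSpace] at hne
  rcases hne with ((((rfl|rfl)|rfl)|rfl)|rfl)|rfl <;> exact absurd h (by decide)

theorem getD_map_natCast_nonneg (o : Option Nat) :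
    0 ≤ (Option.map (fun n : Int => n) (do let a ← o; pure ((a : Int)))).getD 0 := by
  cases o <;> simp

theorem dropWhile_eq_self_of_all (p : Char → Bool) (l : List Char) (h : ∀ c ∈ l, p c = false) :
    List.dropWhile p l = l := by
  cases l with
  | nil => rfl
  | cons c cs => rw [List.dropWhile_cons_of_neg]; simp [h c (by simp)]

theorem ofChars?_nonneg_of_isdigit (cs : List Char) (h : PySem.Chars.strIsdigit cs = true) :
    0 ≤ (PySem.Int.ofChars? cs).getD 0 := by
  simp [PySem.Chars.strIsdigit] at h
  obtain ⟨hne, hall⟩ := h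
  have hsp : ∀ c ∈ cs, PySem.Int.isIntSpace c = false :=
    fun c hc => isIntSpace_eq_false_of_isdigit c (hall c hc)
  have h1 : List.dropWhile PySem.Int.isIntSpace cs = cs := dropWhile_eq_self_of_all _ _ hsp
  have h2 : List.dropWhile PySem.Int.isIntSpace cs.reverse = cs.reverse :=
    dropWhile_eq_self_of_all _ _ (fun c hc => hsp c (List.mem_reverse.mp hc))
  unfold PySem.Int.ofChars?
  rw [h1, h2, List.reverse_reverse]
  dsimp only
  split
  · next ds =>
    exact absurd (hall '-' (by simp)) (by decide)
  · next ds =>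
    exact absurd (hall '+' (by simp)) (by decide)
  · exact getD_map_natCast_nonneg _

theorem ofStr?_nonneg_of_isdigit (s : String) (h : PySem.Str.strIsdigit s = true) :
    0 ≤ (PySem.Int.ofStr? s).getD 0 := by
  simp only [pysem] at h
  exact ofChars?_nonneg_of_isdigit s.toList h

theorem scanA_h (n : Int) (hn : 0 ≤ n) :
    scanA [0, 132, 300, 588] ["Juvenile", "Adolescent", "Mature", "Senior"] n [0, 132, 300, 588] =
      (true, ["Juvenile", "Adolescent", "Mature", "Senior"].getD
        ((if (132:Int) ≤ n then 1 else 0) + (if (300:Int) ≤ n then 1 else 0) +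
          (if (588:Int) ≤ n then 1 else 0)) "") := by
  simp only [scanA, PySem.List.index?, PySem.List.pyGetD]
  norm_num
  split_ifs <;> first | rfl | omega

theorem scanA_d (n : Int) (hn : 0 ≤ n) :
    scanA [0, 6, 24, 84] ["Juvenile", "Adolescent", "Mature", "Senior"] n [0, 6, 24, 84] =
      (true, ["Juvenile", "Adolescent", "Mature", "Senior"].getD
        ((if (6:Int) ≤ n then 1 else 0) + (if (24:Int) ≤ n then 1 else 0) +
          (if (84:Int) ≤ n then 1 else 0)) "") := by
  simp only [scanA, PySem.List.index?, PySem.List.pyGetD]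
  norm_num
  split_ifs <;> first | rfl | omega

-- ===== VERDICT (by name: the statement is the Claim_ definition above) =====
theorem lifeStage_spec : Claim_equal_lifeStage := by
  intro mammal age _
  unfold Spec_lifeStage lifeStage lifeStage_alt
  by_cases hm : mammal = "h"
  · subst hm
    by_cases ha : PySem.Str.strIsdigit age = true
    · simp only [ha, List.contains_cons, beq_self_eq_true]
      simp [scanA_h _ (ofStr?_nonneg_of_isdigit age ha)]
    · rw [Bool.not_eq_true] at ha
      simp only [pysem] at ha
      simp [ha, PySem.List.pyGetD]
  · by_cases hd : mammal = "d"
    · subst hd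
      by_cases ha : PySem.Str.strIsdigit age = true
      · simp only [ha]
        simp [scanA_d _ (ofStr?_nonneg_of_isdigit age ha)]
      · rw [Bool.not_eq_true] at ha
        simp only [pysem] at ha
        simp [ha, PySem.List.pyGetD]
    · by_cases ha : PySem.Str.strIsdigit age = true
      · simp [hm, hd, PySem.List.pyGetD]
      · simp [hm, hd, PySem.List.pyGetD]
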